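-- pv_equiv track=rewrite | github.com/J3r3C0/tools | analyzer/sheratan-reconciler-sheratan-conform/src/analyzers/file_structure.py | _find_missing_files
-- ===== SOURCE A (Python) =====
-- from typing import Dict, List, Set, Tuple
--
-- def _find_missing_files(file_trees: Dict[str, Set[str]]) -> Dict[str, Set[str]]:
--     """Find files missing from each version (present in others).
--
--     Args:
--         file_trees: Dictionary of version -> file set
--
--     Returns:
--         Dictionary mapping version to missing files
--     """
--     missing = {}
--     all_files = set()
--
--     for files in file_trees.values():
--         all_files.update(files)
--
--     for version, files in file_trees.items():
--         missing[version] = all_files - files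
--
--     return missing
-- ===== SOURCE B (Python) =====
-- def _find_missing_files(file_trees):
--     """Find files missing from each version (present in others).
--
--     Inverted index: for each file, record which versions hold it; a file is
--     missing from a version iff that version is not among its holders.
--     """
--     holders = {}
--     for version, files in file_trees.items():
--         for f in files:
--             holders.setdefault(f, set()).add(version)
--     missing = {}
--     for version in file_trees:
--         missing[version] = {f for f in holders if version not in holders[f]}
--     return missing
-- ===== Notes on version B (the rewrite author's own statement) =====
-- stated objective: alternative
-- what changed: Replaces A's two whole-set passes (union of all file sets, then a set subtraction per version) with an inverted index mapping each file to the set of versions holding it, then marks a file missing from a version iff that version is absent from the file's holder set.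
import Mathlib
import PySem

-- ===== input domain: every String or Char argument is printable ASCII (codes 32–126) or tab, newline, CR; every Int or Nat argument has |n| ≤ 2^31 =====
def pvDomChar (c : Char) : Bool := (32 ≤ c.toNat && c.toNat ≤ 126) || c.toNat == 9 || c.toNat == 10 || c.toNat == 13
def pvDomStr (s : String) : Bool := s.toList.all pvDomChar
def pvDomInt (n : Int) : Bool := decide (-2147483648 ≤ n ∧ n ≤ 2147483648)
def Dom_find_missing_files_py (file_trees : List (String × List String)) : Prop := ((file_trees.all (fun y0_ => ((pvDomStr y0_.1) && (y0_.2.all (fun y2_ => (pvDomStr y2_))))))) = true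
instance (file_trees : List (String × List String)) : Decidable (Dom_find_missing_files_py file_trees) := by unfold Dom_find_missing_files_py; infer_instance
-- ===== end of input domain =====

-- B replaces A's whole-set union/subtraction with an inverted index (file -> holding
-- versions) and tests membership per file; same result, a different data structure (objective: alternative).

-- ===== PORT A =====
def find_missing_files_py (file_trees : List (String × List String)) : List (String × List String) :=
  let all_files : PySem.Set String :=
    file_trees.foldl (fun acc p => PySem.Set.update acc p.2) PySem.Set.empty
  let missing : PySem.Dict String (List String) :=
    file_trees.foldl (fun m p => m.insert p.1 (PySem.Set.diff all_files p.2)) PySem.Dict.empty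
  missing.items

-- ===== PORT B =====
def find_missing_files_py_alt (file_trees : List (String × List String)) : List (String × List String) :=
  let holders : PySem.Dict String (PySem.Set String) :=
    file_trees.foldl (fun h p =>
      p.2.foldl (fun h f => h.modify f PySem.Set.empty (fun s => PySem.Set.add s p.1)) h)
      PySem.Dict.empty
  let missing : PySem.Dict String (List String) :=
    file_trees.foldl (fun m p =>
      m.insert p.1 (PySem.Set.ofList
        (holders.keys.filter (fun f => !((holders.getD f PySem.Set.empty).contains p.1)))))
      PySem.Dict.empty
  missing.items

-- ===== PRECONDITION & SPEC =====
-- A Python dict cannot have duplicate keys, so an association list with a repeated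
-- version key is not the encoding of any Python input; Pre_ admits exactly the valid encodings.
def Pre_find_missing_files_py (file_trees : List (String × List String)) : Prop :=
  (file_trees.map Prod.fst).Nodup
instance (file_trees : List (String × List String)) : Decidable (Pre_find_missing_files_py file_trees) := by unfold Pre_find_missing_files_py; infer_instance

def pvWitness_find_missing_files_py : (List (String × List String)) :=
  [("v1", ["a", "b"]), ("v2", ["b"])]

def Spec_find_missing_files_py (file_trees : List (String × List String)) (out : List (String × List String)) : Prop := out = find_missing_files_py_alt file_trees
instance (file_trees : List (String × List String)) (out : List (String × List String)) : Decidable (Spec_find_missing_files_py file_trees out) := by unfold Spec_find_missing_files_py; infer_instance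

-- ===== CLAIM (what is proved, stated in full; the proofs are below) =====
def Claim_equal_find_missing_files_py : Prop := ∀ (file_trees : List (String × List String)), Dom_find_missing_files_py file_trees → Pre_find_missing_files_py file_trees → Spec_find_missing_files_py file_trees (find_missing_files_py file_trees)

-- ===== LEMMAS AND PROOFS =====

-- A's first loop is set(union of all value lists, first occurrences in order).
theorem pv_all_files_eq (F : List (String × List String)) (s : PySem.Set String) :
    F.foldl (fun acc p => PySem.Set.update acc p.2) s
      = PySem.Set.update s (F.flatMap Prod.snd) := by
  induction F generalizing s with
  | nil => simp [PySem.Set.update_nil]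
  | cons p F ih => simp [List.flatMap_cons, PySem.Set.update_append, ih]

-- holders' key list is the same first-occurrence list of all files.
theorem pv_holders_keys (F : List (String × List String)) (d : PySem.Dict String (PySem.Set String)) :
    (F.foldl (fun h p =>
        p.2.foldl (fun h f => h.modify f PySem.Set.empty (fun s => PySem.Set.add s p.1)) h) d).keys
      = PySem.Set.update d.keys (F.flatMap Prod.snd) := by
  induction F generalizing d with
  | nil => simp [PySem.Set.update_nil]
  | cons p F ih =>
      simp only [List.foldl_cons, List.flatMap_cons, PySem.Set.update_append, ih]
      rw [PySem.Dict.keys_foldl_modify p.2 PySem.Set.empty (fun _ _ => fun s => PySem.Set.add s p.1) d]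

-- membership in holders[f] after the inner loop over one version's files
theorem pv_inner_mem (l : List String) (w : String) (d : PySem.Dict String (PySem.Set String))
    (v f : String) :
    (v ∈ (l.foldl (fun h g => h.modify g PySem.Set.empty (fun s => PySem.Set.add s w)) d).getD f PySem.Set.empty
      ↔ v ∈ d.getD f PySem.Set.empty ∨ (f ∈ l ∧ v = w)) := by
  induction l generalizing d with
  | nil => simp
  | cons a l ih =>
      simp only [List.foldl_cons, ih, PySem.Dict.getD_modify, List.mem_cons]
      by_cases hfa : f = a
      · subst hfa
        rw [if_pos rfl]
        simp only [PySem.Set.mem_add]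
        tauto
      · rw [if_neg hfa]
        tauto

-- membership in holders[f]: exactly the versions whose file set contains f
theorem pv_holders_mem (F : List (String × List String)) (d : PySem.Dict String (PySem.Set String))
    (v f : String) :
    (v ∈ (F.foldl (fun h p =>
        p.2.foldl (fun h g => h.modify g PySem.Set.empty (fun s => PySem.Set.add s p.1)) h) d).getD f PySem.Set.empty
      ↔ v ∈ d.getD f PySem.Set.empty ∨ ∃ p ∈ F, f ∈ p.2 ∧ v = p.1) := by
  induction F generalizing d with
  | nil => simp
  | cons p F ih =>
      simp only [List.foldl_cons, ih, pv_inner_mem, List.mem_cons]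
      constructor
      · rintro (⟨h | ⟨hf, hv⟩⟩ | ⟨q, hq, hfq, hvq⟩)
        · exact Or.inl h
        · exact Or.inr ⟨p, Or.inl rfl, hf, hv⟩
        · exact Or.inr ⟨q, Or.inr hq, hfq, hvq⟩
      · rintro (h | ⟨q, (rfl | hq), hfq, hvq⟩)
        · exact Or.inl (Or.inl h)
        · exact Or.inl (Or.inr ⟨hfq, hvq⟩)
        · exact Or.inr ⟨q, hq, hfq, hvq⟩

-- under Nodup keys, any pair sharing p's key has p's value list
theorem pv_key_unique (F : List (String × List String)) (hnd : (F.map Prod.fst).Nodup)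
    {p q : String × List String} (hp : p ∈ F) (hq : q ∈ F) (hk : p.1 = q.1) : p.2 = q.2 := by
  induction F with
  | nil => cases hp
  | cons r F ih =>
      simp only [List.map_cons, List.nodup_cons] at hnd
      rcases List.mem_cons.1 hp with rfl | hp' <;> rcases List.mem_cons.1 hq with rfl | hq'
      · rfl
      · exact absurd (hk ▸ List.mem_map_of_mem hq') hnd.1
      · exact absurd (hk ▸ List.mem_map_of_mem hp') hnd.1
      · exact ih hnd.2 hp' hq'

-- bridge: List.contains as membership
theorem pv_contains_iff (l : List String) (x : String) : l.contains x = true ↔ x ∈ l := by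
  simp

-- A's subtraction all_files - files equals B's per-file holder test, pair by pair
theorem pv_value (F : List (String × List String)) (hnd : (F.map Prod.fst).Nodup)
    (p : String × List String) (hp : p ∈ F) :
    PySem.Set.diff (F.foldl (fun acc q => PySem.Set.update acc q.2) PySem.Set.empty) p.2
      = PySem.Set.ofList
          (((F.foldl (fun h q =>
              q.2.foldl (fun h g => h.modify g PySem.Set.empty (fun s => PySem.Set.add s q.1)) h)
              (PySem.Dict.empty : PySem.Dict String (PySem.Set String))).keys).filter
            (fun f => !(((F.foldl (fun h q =>
              q.2.foldl (fun h g => h.modify g PySem.Set.empty (fun s => PySem.Set.add s q.1)) h)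
              (PySem.Dict.empty : PySem.Dict String (PySem.Set String))).getD f PySem.Set.empty).contains p.1))) := by
  rw [pv_all_files_eq, pv_holders_keys]
  have h1 : PySem.Set.update (PySem.Set.empty : PySem.Set String) (F.flatMap Prod.snd)
      = PySem.Set.ofList (F.flatMap Prod.snd) := rfl
  have h2 : PySem.Set.update ((PySem.Dict.empty : PySem.Dict String (PySem.Set String)).keys) (F.flatMap Prod.snd)
      = PySem.Set.ofList (F.flatMap Prod.snd) := rfl
  rw [h1, h2]
  have h3 : PySem.Set.ofList
        (List.filter
          (fun f => !(((F.foldl (fun h q =>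
              q.2.foldl (fun h g => h.modify g PySem.Set.empty (fun s => PySem.Set.add s q.1)) h)
              (PySem.Dict.empty : PySem.Dict String (PySem.Set String))).getD f PySem.Set.empty).contains p.1))
          (PySem.Set.ofList (F.flatMap Prod.snd)))
      = List.filter
          (fun f => !(((F.foldl (fun h q =>
              q.2.foldl (fun h g => h.modify g PySem.Set.empty (fun s => PySem.Set.add s q.1)) h)
              (PySem.Dict.empty : PySem.Dict String (PySem.Set String))).getD f PySem.Set.empty).contains p.1))
          (PySem.Set.ofList (F.flatMap Prod.snd)) :=
    PySem.Set.ofList_eq_self_of_nodup _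
      ((PySem.Set.nodup_ofList (F.flatMap Prod.snd)).filter _)
  rw [h3]
  show (PySem.Set.ofList (F.flatMap Prod.snd)).filter (fun x => !(p.2.contains x)) = _
  apply List.filter_congr
  intro f hf
  set H := F.foldl (fun h q =>
      q.2.foldl (fun h g => h.modify g PySem.Set.empty (fun s => PySem.Set.add s q.1)) h)
      (PySem.Dict.empty : PySem.Dict String (PySem.Set String)) with hH
  have hmem : p.1 ∈ H.getD f PySem.Set.empty ↔ f ∈ p.2 := by
    rw [hH, pv_holders_mem]
    constructor
    · rintro (h | ⟨q, hq, hfq, hvq⟩)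
      · simp [PySem.Dict.getD_empty] at h
      · rw [pv_key_unique F hnd hp hq hvq]; exact hfq
    · intro h; exact Or.inr ⟨p, hp, h, rfl⟩
  have hb : (p.2.contains f) = ((H.getD f PySem.Set.empty).contains p.1) := by
    by_cases hf2 : f ∈ p.2
    · rw [(pv_contains_iff _ _).2 hf2]
      exact ((pv_contains_iff _ _).2 (hmem.2 hf2)).symm
    · have hc1 : p.2.contains f = false := by
        cases hc : p.2.contains f
        · rfl
        · exact absurd ((pv_contains_iff _ _).1 hc) hf2
      have hc2 : (H.getD f PySem.Set.empty).contains p.1 = false := by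
        cases hc : (H.getD f PySem.Set.empty).contains p.1
        · rfl
        · exact absurd (hmem.1 ((pv_contains_iff _ _).1 hc)) hf2
      rw [hc1]
      exact hc2.symm
  show (!(p.2.contains f)) = _
  rw [hb]

-- ===== VERDICT (by name: the statement is the Claim_ definition above) =====
theorem find_missing_files_py_spec : Claim_equal_find_missing_files_py := by
  intro F _ hnd
  unfold Spec_find_missing_files_py find_missing_files_py find_missing_files_py_alt
  simp only []
  rw [PySem.Dict.items_foldl_insert_fresh F Prod.fst _ PySem.Dict.empty
        (by intro a _; exact PySem.Dict.contains_empty _) hnd,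
      PySem.Dict.items_foldl_insert_fresh F Prod.fst _ PySem.Dict.empty
        (by intro a _; exact PySem.Dict.contains_empty _) hnd]
  simp only [show (PySem.Dict.empty : PySem.Dict String (List String)).items = [] from rfl, List.nil_append]
  apply List.map_congr_left
  intro p hp
  exact Prod.ext rfl (pv_value F hnd p hp)
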